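-- pv_equiv track=rewrite | github.com/yudai-patronai/problembook | problems/while/decimal_to_babylonian/solution.py | dec2babyl
-- ===== SOURCE A (Python) =====
-- def dec2babyl(num):
--     # представление числа в вавилонской системе
--     # decimal = a0 * 60^0 + a1 * 60^1 + ... + an * 60^n
--
--     babyl = ''
--
--     n = 0
--     dec_ceil = 60
--     while True:  # поиск ограничения сверху
--         if dec_ceil > num:
--             break
--         else:
--             n += 1
--             dec_ceil += 59 * 60**n
--
--     for i in range(n, -1, -1):
--         a_i = num // (60 ** i)
--         num -= a_i * 60**i
--
--         babyl_a = '<' * (a_i // 10)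
--         babyl_a += 'v' * (a_i % 10)
--         babyl += babyl_a
--         if i != 0:
--             babyl += '.'
--
--     return babyl
-- ===== SOURCE B (Python) =====
-- def dec2babyl(num):
--     # recursive base-60 conversion: no upper-bound search pass
--     if num < 60:
--         return '<' * (num // 10) + 'v' * (num % 10)
--     return dec2babyl(num // 60) + '.' + '<' * ((num % 60) // 10) + 'v' * ((num % 60) % 10)
-- ===== Notes on version B (the rewrite author's own statement) =====
-- stated objective: simpler
-- what changed: Replaced A's two-pass scheme (a while-loop that searches for the number of base-60 digits, then an index-driven for-loop peeling off powers of 60 while accumulating the string) with a direct recursive base-60 conversion on num//60 that emits digits most-significant-first; the length-counting pass and all explicit powers of 60 disappear.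
import Mathlib
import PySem

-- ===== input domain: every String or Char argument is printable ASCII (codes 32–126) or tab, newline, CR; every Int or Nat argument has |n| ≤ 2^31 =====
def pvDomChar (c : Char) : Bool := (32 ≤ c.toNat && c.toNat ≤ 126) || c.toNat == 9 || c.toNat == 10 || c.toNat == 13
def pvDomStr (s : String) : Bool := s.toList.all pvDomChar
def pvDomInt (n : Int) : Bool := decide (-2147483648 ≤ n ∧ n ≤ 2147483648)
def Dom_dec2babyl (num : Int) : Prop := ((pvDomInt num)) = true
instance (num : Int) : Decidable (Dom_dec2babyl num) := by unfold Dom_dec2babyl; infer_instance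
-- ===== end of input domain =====

-- B replaces A's two-pass conversion (digit-count search loop + power-of-60 for-loop) by a
-- direct recursive base-60 conversion; simpler decomposition, same exact output.


-- ===== PORT A =====
-- A's 'while True' upper-bound search: state (n, dec_ceil); dec_ceil grows by 59*60^(n+1) each turn.
def dec2babylFindN (num : Int) (n : Nat) (dec_ceil : Int) : Nat :=
  if _h : dec_ceil > num then n
  else dec2babylFindN num (n + 1) (dec_ceil + 59 * 60 ^ (n + 1))
termination_by (num - dec_ceil + 1).toNat
decreasing_by
  have h1 : (0:Int) < 59 * 60 ^ (n + 1) := by positivity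
  generalize (59:Int) * 60 ^ (n + 1) = A at h1 ⊢
  omega

-- the loop body of A's 'for i in range(n, -1, -1)'; state = (num, babyl) as a List Char.
-- '60 ** i' with i ≥ 0 from the range is ported as 60 ^ i.toNat; 'c' * k (empty for k < 0)
-- is List.replicate k.toNat c; babyl is kept as List Char (String.mk at the end) because
-- Lean's String.append is kernel-opaque.
def dec2babylBody (st : Int × List Char) (i : Int) : Int × List Char :=
  let p : Int := 60 ^ i.toNat
  let a_i := PySem.Int.floordiv st.1 p
  let num' := st.1 - a_i * p
  let babyl_a := List.replicate (PySem.Int.floordiv a_i 10).toNat '<'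
    ++ List.replicate (PySem.Int.mod a_i 10).toNat 'v'
  (num', st.2 ++ babyl_a ++ (if i ≠ 0 then ['.'] else []))

def dec2babyl (num : Int) : String :=
  String.mk
    (((PySem.List.pyRange ((dec2babylFindN num 0 60 : Nat) : Int) (-1) (-1)).foldl
        dec2babylBody (num, [])).2)

-- ===== PORT B =====
def dec2babylAltChars (num : Int) : List Char :=
  if num < 60 then
    List.replicate (PySem.Int.floordiv num 10).toNat '<'
      ++ List.replicate (PySem.Int.mod num 10).toNat 'v'
  else
    dec2babylAltChars (PySem.Int.floordiv num 60) ++ ['.']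
      ++ List.replicate (PySem.Int.floordiv (PySem.Int.mod num 60) 10).toNat '<'
      ++ List.replicate (PySem.Int.mod (PySem.Int.mod num 60) 10).toNat 'v'
termination_by num.toNat
decreasing_by
  rename_i h
  rw [PySem.Int.floordiv_eq_ediv_of_pos (by omega)]
  have h1 : num / 60 < num := by
    rw [Int.ediv_lt_iff_lt_mul (by omega)]
    nlinarith [show (60:Int) ≤ num by omega]
  have h2 : (0:Int) ≤ num / 60 := Int.ediv_nonneg (by omega) (by omega)
  omega

def dec2babyl_alt (num : Int) : String := String.mk (dec2babylAltChars num)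

-- ===== PRECONDITION & SPEC =====
def Spec_dec2babyl (num : Int) (out : String) : Prop := out = dec2babyl_alt num
instance (num : Int) (out : String) : Decidable (Spec_dec2babyl num out) := by unfold Spec_dec2babyl; infer_instance

-- ===== CLAIM (what is proved, stated in full; the proofs are below) =====
def Claim_equal_dec2babyl : Prop := ∀ (num : Int), Dom_dec2babyl num → Spec_dec2babyl num (dec2babyl num)

-- ===== LEMMAS AND PROOFS =====

-- one Babylonian "digit" (A's babyl_a, B's replicate pair)
def babDig (a : Int) : List Char :=
  List.replicate (PySem.Int.floordiv a 10).toNat '<' ++ List.replicate (PySem.Int.mod a 10).toNat 'v'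

-- what A's for-loop renders for a fixed digit count n+1, top digit first
def babW : Nat → Int → List Char
  | 0, num => babDig num
  | n + 1, num =>
      babDig (PySem.Int.floordiv num (60 ^ (n + 1))) ++ ['.']
        ++ babW n (PySem.Int.mod num (60 ^ (n + 1)))

-- the list range(n, -1, -1), most-significant index first
def revRange : Nat → List Int
  | 0 => [0]
  | n + 1 => ((n : Int) + 1) :: revRange n

lemma revRange_eq (n : Nat) :
    (List.range (n + 1)).map (fun k : Nat => (n : Int) - (k : Int)) = revRange n := by
  induction n with
  | zero => simp [revRange]
  | succ n ih =>
    rw [List.range_succ_eq_map, List.map_cons, List.map_map, revRange]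
    congr 1
    rw [← ih]
    apply List.map_congr_left
    intro k _
    simp only [Function.comp_apply, Nat.succ_eq_add_one]
    push_cast
    ring

lemma pyRange_rev (n : Nat) :
    PySem.List.pyRange (n : Int) (-1) (-1) = revRange n := by
  rw [← revRange_eq]
  simp only [PySem.List.pyRange]
  norm_num
  rw [if_pos (by omega : (-1:Int) < (n : Int))]
  apply List.map_congr_left
  intro k _
  ring

lemma foldl_body_eq (n : Nat) :
    ∀ (num : Int) (acc : List Char),
      ((revRange n).foldl dec2babylBody (num, acc)).2 = acc ++ babW n num := by
  induction n with
  | zero =>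
    intro num acc
    simp only [revRange, List.foldl_cons, List.foldl_nil, dec2babylBody, babW, babDig]
    have hfd : PySem.Int.floordiv num 1 = num := by
      rw [PySem.Int.floordiv_eq_ediv_of_pos (by norm_num)]
      exact Int.ediv_one num
    norm_num [hfd]
  | succ n ih =>
    intro num acc
    have ht : (((n : Int) + 1)).toNat = n + 1 := by omega
    have hmod : num - PySem.Int.floordiv num (60 ^ (n + 1)) * 60 ^ (n + 1)
        = PySem.Int.mod num (60 ^ (n + 1)) := by
      have := PySem.Int.floordiv_mul_add_mod num (60 ^ (n + 1))
      linarith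
    simp only [revRange, List.foldl_cons, dec2babylBody, ht,
      if_pos (by omega : ((n : Int) + 1) ≠ 0)]
    rw [ih, hmod]
    simp [babW, babDig, List.append_assoc]

lemma babW_bottom (n : Nat) :
    ∀ num : Int,
      babW (n + 1) num
        = babW n (PySem.Int.floordiv num 60) ++ ['.'] ++ babDig (PySem.Int.mod num 60) := by
  induction n with
  | zero =>
    intro num
    simp [babW, List.append_assoc]
  | succ n ih =>
    intro num
    have e1 : PySem.Int.floordiv (PySem.Int.floordiv num 60) (60 ^ (n + 1))
        = PySem.Int.floordiv num (60 ^ (n + 2)) := by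
      rw [PySem.Int.floordiv_eq_ediv_of_pos (by positivity),
        PySem.Int.floordiv_eq_ediv_of_pos (by positivity),
        PySem.Int.floordiv_eq_ediv_of_pos (by positivity),
        Int.ediv_ediv_of_nonneg (x := num) (y := 60) (by norm_num)]
      ring_nf
    have e2 : PySem.Int.floordiv (PySem.Int.mod num (60 ^ (n + 2))) 60
        = PySem.Int.mod (PySem.Int.floordiv num 60) (60 ^ (n + 1)) := by
      rw [PySem.Int.floordiv_eq_ediv_of_pos (by positivity),
        PySem.Int.floordiv_eq_ediv_of_pos (by positivity),
        PySem.Int.mod_eq_emod_of_pos (by positivity),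
        PySem.Int.mod_eq_emod_of_pos (by positivity)]
      have h1 : num % 60 ^ (n + 2) = num + (-(60 ^ (n + 1) * (num / 60 ^ (n + 2)))) * 60 := by
        rw [Int.emod_def]; ring
      rw [h1, Int.add_mul_ediv_right _ _ (by norm_num : (60:Int) ≠ 0)]
      have h2 : num / 60 ^ (n + 2) = (num / 60) / 60 ^ (n + 1) := by
        rw [Int.ediv_ediv_of_nonneg (x := num) (y := 60) (by norm_num)]; ring_nf
      rw [h2, Int.emod_def]; ring
    have e3 : PySem.Int.mod (PySem.Int.mod num (60 ^ (n + 2))) 60 = PySem.Int.mod num 60 := by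
      rw [PySem.Int.mod_eq_emod_of_pos (by positivity),
        PySem.Int.mod_eq_emod_of_pos (by positivity),
        PySem.Int.mod_eq_emod_of_pos (by positivity)]
      exact Int.emod_emod_of_dvd num (Dvd.intro (60 ^ (n + 1)) (by ring))
    calc babW (n + 2) num
        = babDig (PySem.Int.floordiv num (60 ^ (n + 2))) ++ ['.']
            ++ babW (n + 1) (PySem.Int.mod num (60 ^ (n + 2))) := rfl
      _ = babDig (PySem.Int.floordiv num (60 ^ (n + 2))) ++ ['.']
            ++ (babW n (PySem.Int.floordiv (PySem.Int.mod num (60 ^ (n + 2))) 60) ++ ['.']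
                ++ babDig (PySem.Int.mod (PySem.Int.mod num (60 ^ (n + 2))) 60)) := by
          rw [ih]
      _ = babW (n + 1) (PySem.Int.floordiv num 60) ++ ['.'] ++ babDig (PySem.Int.mod num 60) := by
          have hdef : babW (n + 1) (PySem.Int.floordiv num 60)
              = babDig (PySem.Int.floordiv (PySem.Int.floordiv num 60) (60 ^ (n + 1))) ++ ['.']
                ++ babW n (PySem.Int.mod (PySem.Int.floordiv num 60) (60 ^ (n + 1))) := rfl
          rw [hdef, e1, e2, e3]
          simp [List.append_assoc]

lemma babW_alt (n : Nat) :
    ∀ num : Int, 0 < num → num < 60 ^ (n + 1) → (n = 0 ∨ 60 ^ n ≤ num) →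
      babW n num = dec2babylAltChars num := by
  induction n with
  | zero =>
    intro num _ hlt _
    rw [babW, dec2babylAltChars, if_pos (by simpa using hlt)]
    rfl
  | succ n ih =>
    intro num hpos hlt hge
    rcases hge with h0 | hge
    · exact absurd h0 (Nat.succ_ne_zero n)
    have h60 : (60:Int) ≤ num := le_trans (by exact_mod_cast le_self_pow₀ (by norm_num) (by omega) : (60:Int) ≤ 60 ^ (n + 1)) hge
    rw [babW_bottom]
    rw [dec2babylAltChars, if_neg (by omega)]
    have hq1 : (1:Int) ≤ PySem.Int.floordiv num 60 := by
      rw [PySem.Int.le_floordiv_iff_mul_le (by norm_num)]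
      omega
    have hq2 : PySem.Int.floordiv num 60 < 60 ^ (n + 1) := by
      rw [PySem.Int.floordiv_lt_iff_lt_mul (by norm_num)]
      calc num < 60 ^ (n + 2) := hlt
        _ = 60 ^ (n + 1) * 60 := by ring
    have hq3 : 60 ^ n ≤ PySem.Int.floordiv num 60 := by
      rw [PySem.Int.le_floordiv_iff_mul_le (by norm_num)]
      calc (60:Int) ^ n * 60 = 60 ^ (n + 1) := by ring
        _ ≤ num := hge
    rw [ih (PySem.Int.floordiv num 60) (by omega) hq2 (Or.inr hq3)]
    simp [babDig, List.append_assoc]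

lemma findN_spec (num : Int) : ∀ (n : Nat) (c : Int), c = 60 ^ (n + 1) →
    num < 60 ^ (dec2babylFindN num n c + 1)
      ∧ (dec2babylFindN num n c = n ∨ 60 ^ (dec2babylFindN num n c) ≤ num) := by
  intro n c
  induction n, c using dec2babylFindN.induct (num := num) with
  | case1 n c h =>
    intro hc
    rw [dec2babylFindN, dif_pos h]
    exact ⟨by omega, Or.inl rfl⟩
  | case2 n c h ih =>
    intro hc
    rw [dec2babylFindN, dif_neg h]
    have hc' : c + 59 * 60 ^ (n + 1) = 60 ^ (n + 1 + 1) := by rw [hc]; ring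
    obtain ⟨ih1, ih2⟩ := ih hc'
    refine ⟨ih1, ?_⟩
    rcases ih2 with he | hge
    · right
      rw [he]
      rw [hc] at h
      omega
    · exact Or.inr hge

-- ===== VERDICT (by name: the statement is the Claim_ definition above) =====
theorem dec2babyl_spec : Claim_equal_dec2babyl := by
  intro num _
  unfold Spec_dec2babyl dec2babyl dec2babyl_alt
  obtain ⟨h1, h2⟩ := findN_spec num 0 60 (by norm_num)
  set n := dec2babylFindN num 0 60 with hn
  rw [pyRange_rev, foldl_body_eq]
  simp only [List.nil_append]
  congr 1
  rcases h2 with h0 | hge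
  · rw [h0, babW, dec2babylAltChars, if_pos (by simpa [h0] using h1)]
    rfl
  · rcases n with _ | m
    · rw [babW, dec2babylAltChars, if_pos (by simpa using h1)]
      rfl
    · have hpos : (0:Int) < num := by
        have : (0:Int) < 60 ^ (m + 1) := by positivity
        omega
      exact babW_alt (m + 1) num hpos h1 (Or.inr hge)
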